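-- pv_equiv track=rewrite | github.com/Hiroshiba/check_english_analyze | tools/process_syllable.py | get_unified_stress
-- ===== SOURCE A (Python) =====
-- def get_unified_stress(stresses: list[int]) -> int:
--     """
--     シラブル内のストレス値のリストから統一されたストレス値を取得する。
--     有効なパターン:
--     1. 全て0。
--     2. 0以外の要素が全て1であり、かつ、それらが連続している。
--     3. 0以外の要素が全て2であり、かつ、それらが連続している。
--     上記以外の場合は ValueError を発生させる。
--     """
--     if not stresses:
--         raise ValueError("ストレス値のリストが空です。")
--
--     if all(s == 0 for s in stresses):
--         return 0
--
--     non_zero_stresses = [s for s in stresses if s != 0]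
--     # non_zero_stresses will not be empty here because all(s == 0) is checked above.
--
--     first_non_zero = non_zero_stresses[0]
--     if not all(s == first_non_zero for s in non_zero_stresses):
--         raise ValueError(f"0以外のストレス値が混在しています: {non_zero_stresses}")
--
--     if first_non_zero not in [1, 2]:
--         raise ValueError(f"不正なストレス値が含まれています: {first_non_zero}")
--
--     start_index = -1
--     end_index = -1
--     for i, stress_val in enumerate(stresses):
--         if stress_val == first_non_zero:
--             if start_index == -1:
--                 start_index = i
--             end_index = i
--
--     # 0以外のストレス値が連続しているかチェック
--     for i in range(start_index, end_index + 1):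
--         if stresses[i] == 0:
--             raise ValueError(
--                 f"0以外のストレス値 ({first_non_zero}) のブロック内に0が含まれています: {stresses}"
--             )
--
--     return first_non_zero
-- ===== SOURCE B (Python) =====
-- def get_unified_stress(stresses: list[int]) -> int:
--     if not stresses:
--         raise ValueError("ストレス値のリストが空です。")
--     nz = [i for i, s in enumerate(stresses) if s != 0]
--     if not nz:
--         return 0
--     values = {stresses[i] for i in nz}
--     if values != {1} and values != {2}:
--         raise ValueError(f"不正なストレス値のパターンです: {stresses}")
--     if nz[-1] - nz[0] + 1 != len(nz):
--         raise ValueError(f"ストレス値のブロックが連続していません: {stresses}")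
--     return stresses[nz[0]]
-- ===== Notes on version B (the rewrite author's own statement) =====
-- stated objective: simpler
-- what changed: B replaces A's second full scan, the enumerate loop tracking start/end indices and the explicit block-scan-for-zeros loop by one comprehension collecting nonzero indices, a set test of their values against {1}/{2}, and an arithmetic contiguity check (last - first + 1 == count).
import Mathlib
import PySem

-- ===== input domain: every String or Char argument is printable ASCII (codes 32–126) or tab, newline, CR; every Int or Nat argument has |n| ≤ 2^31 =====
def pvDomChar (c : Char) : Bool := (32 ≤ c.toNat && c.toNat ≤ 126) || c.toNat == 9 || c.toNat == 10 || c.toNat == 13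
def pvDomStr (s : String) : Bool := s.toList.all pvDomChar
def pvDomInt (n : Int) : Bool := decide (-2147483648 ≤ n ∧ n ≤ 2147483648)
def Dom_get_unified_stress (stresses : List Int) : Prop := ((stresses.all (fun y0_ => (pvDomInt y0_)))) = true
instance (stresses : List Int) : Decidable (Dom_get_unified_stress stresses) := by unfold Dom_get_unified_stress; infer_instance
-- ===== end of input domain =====

-- B replaces A's block-scan loops by a one-pass index comprehension plus an arithmetic
-- contiguity check (span = count) — objective: simpler decomposition, same cost.

-- ===== PORT A =====
-- Python raises ValueError on the inputs excluded by Pre_; the port returns 0 at those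
-- raise points (Pre_ excludes them, nothing is claimed there).
def get_unified_stress (stresses : List Int) : Int :=
  if stresses = [] then 0  -- raise ValueError
  else if stresses.all (fun s => s == 0) then 0
  else
    let non_zero_stresses := stresses.filter (fun s => s != 0)
    let first_non_zero := non_zero_stresses.headD 0
    if ¬ (non_zero_stresses.all (fun s => s == first_non_zero)) then 0  -- raise ValueError
    else if ¬ (first_non_zero = 1 ∨ first_non_zero = 2) then 0  -- raise ValueError
    else
      -- for i, stress_val in enumerate(stresses): track start_index / end_index
      let se := (PySem.List.enumerate stresses).foldl
        (fun (p : Int × Int) iv =>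
          if iv.2 == first_non_zero then
            ((if p.1 == -1 then iv.1 else p.1), iv.1)
          else p) (-1, -1)
      -- for i in range(start_index, end_index + 1): raise if stresses[i] == 0
      -- (indices are always in range here; default 1 is never the looked-up value's source)
      if (PySem.List.pyRange se.1 (se.2 + 1) 1).any
           (fun i => PySem.List.pyGetD stresses i 1 == 0) then 0  -- raise ValueError
      else first_non_zero

-- ===== PORT B =====
def get_unified_stress_alt (stresses : List Int) : Int :=
  if stresses = [] then 0  -- raise ValueError
  else
    let nz := ((PySem.List.enumerate stresses).filter (fun p => p.2 != 0)).map (fun p => p.1)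
    if nz = [] then 0
    else
      let values : PySem.Set Int :=
        PySem.Set.ofList (nz.map (fun i => PySem.List.pyGetD stresses i 0))
      if ¬ PySem.Set.equal values [1] ∧ ¬ PySem.Set.equal values [2] then 0  -- raise ValueError
      else if ¬ (nz.getLastD 0 - nz.headD 0 + 1 = (nz.length : Int)) then 0  -- raise ValueError
      else PySem.List.pyGetD stresses (nz.headD 0) 0

-- ===== PRECONDITION & SPEC =====
-- Pre_ excludes exactly the inputs on which Python A raises ValueError: the empty list,
-- mixed or out-of-range nonzero values, and non-contiguous nonzero blocks.  Valid inputs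
-- are precisely: zeros, then a nonempty constant block of v ∈ {1,2}, then zeros (or all zeros).
def Pre_get_unified_stress (stresses : List Int) : Prop :=
  stresses ≠ [] ∧
  ((∀ s ∈ stresses, s = 0) ∨
   ∃ v ∈ ([1, 2] : List Int), ∃ a < stresses.length, ∃ k < stresses.length + 1,
     ∃ b < stresses.length, 1 ≤ k ∧
       stresses = List.replicate a 0 ++ List.replicate k v ++ List.replicate b 0)
instance (stresses : List Int) : Decidable (Pre_get_unified_stress stresses) := by
  unfold Pre_get_unified_stress; infer_instance
def pvWitness_get_unified_stress : List Int := [0, 1, 1, 0]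

def Spec_get_unified_stress (stresses : List Int) (out : Int) : Prop := out = get_unified_stress_alt stresses
instance (stresses : List Int) (out : Int) : Decidable (Spec_get_unified_stress stresses out) := by unfold Spec_get_unified_stress; infer_instance

-- ===== CLAIM (what is proved, stated in full; the proofs are below) =====
def Claim_equal_get_unified_stress : Prop := ∀ (stresses : List Int), Dom_get_unified_stress stresses → Pre_get_unified_stress stresses → Spec_get_unified_stress stresses (get_unified_stress stresses)

-- ===== LEMMAS AND PROOFS =====
-- helper lemmas for the proofs

theorem pvFilterEnumZero (xs : List Int) (s : Int) (h : ∀ x ∈ xs, x = 0) :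
    (PySem.List.enumerate xs s).filter (fun p => p.2 != 0) = [] := by
  rw [List.filter_eq_nil_iff]
  intro p hp
  rw [PySem.List.mem_enumerate_iff] at hp
  obtain ⟨k, hk, rfl⟩ := hp
  simp [h _ (List.getElem_mem hk)]

theorem pvFilterEnumNonzero (m : Nat) (v s : Int) (hv : v ≠ 0) :
    (PySem.List.enumerate (List.replicate m v) s).filter (fun p => p.2 != 0)
      = PySem.List.enumerate (List.replicate m v) s := by
  rw [List.filter_eq_self]
  intro p hp
  rw [PySem.List.mem_enumerate_iff] at hp
  obtain ⟨k, hk, rfl⟩ := hp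
  simp [hv]

theorem pvZfold (v : Int) (hv : v ≠ 0) (m : Nat) : ∀ (s : Int) (st : Int × Int),
    List.foldl (fun (p : Int × Int) (iv : Int × Int) =>
        if iv.2 == v then ((if p.1 == -1 then iv.1 else p.1), iv.1) else p)
      st (PySem.List.enumerate (List.replicate m (0:Int)) s) = st := by
  induction m with
  | zero => intro s st; simp [PySem.List.enumerate_nil]
  | succ m ih =>
    intro s st
    simp only [List.replicate_succ, PySem.List.enumerate_cons, List.foldl_cons]
    rw [if_neg (by simp only [beq_iff_eq]; exact fun h => hv h.symm)]
    exact ih _ _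

theorem pvMfold' (v : Int) (m : Nat) : ∀ (s x j : Int), x ≠ -1 →
    List.foldl (fun (p : Int × Int) (iv : Int × Int) =>
        if iv.2 == v then ((if p.1 == -1 then iv.1 else p.1), iv.1) else p)
      (x, j) (PySem.List.enumerate (List.replicate m v) s)
      = (x, if m = 0 then j else s + m - 1) := by
  induction m with
  | zero => intro s x j _; simp [PySem.List.enumerate_nil]
  | succ m ih =>
    intro s x j hx
    simp only [List.replicate_succ, PySem.List.enumerate_cons, List.foldl_cons]
    rw [if_pos (by simp), if_neg (by simp [hx])]
    rw [ih (s+1) x s hx]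
    by_cases h : m = 0
    · simp [h]
    · simp only [h, if_false]
      congr 1
      push_cast
      ring

theorem pvMfold (v : Int) (k : Nat) (hk : 1 ≤ k) (s : Int) (hs : 0 ≤ s) :
    List.foldl (fun (p : Int × Int) (iv : Int × Int) =>
        if iv.2 == v then ((if p.1 == -1 then iv.1 else p.1), iv.1) else p)
      (-1, -1) (PySem.List.enumerate (List.replicate k v) s)
      = (s, s + k - 1) := by
  obtain ⟨m, rfl⟩ : ∃ m, k = m + 1 := ⟨k - 1, by omega⟩
  simp only [List.replicate_succ, PySem.List.enumerate_cons, List.foldl_cons]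
  rw [if_pos (by simp), if_pos (by simp)]
  rw [pvMfold' v m (s+1) s s (by omega)]
  by_cases h : m = 0
  · simp [h]
  · simp only [h, if_false]
    congr 1
    push_cast
    ring

theorem pvGetMid (a k b : Nat) (v d : Int) (i : Int)
    (h1 : (a:Int) ≤ i) (h2 : i < (a:Int) + k) :
    PySem.List.pyGetD (List.replicate a 0 ++ List.replicate k v ++ List.replicate b 0) i d
      = v := by
  have h0 : 0 ≤ i := le_trans (Int.natCast_nonneg a) h1
  have hlen : i < (((List.replicate a (0:Int) ++ List.replicate k v ++ List.replicate b 0)).length : Int) := by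
    simp; omega
  rw [PySem.List.pyGetD_eq_getElem _ _ h0 hlen]
  rw [List.getElem_append_left (by simp; omega)]
  rw [List.getElem_append_right (by simp; omega)]
  simp

theorem pvOfListRepAux (v : Int) (m : Nat) :
    List.foldl PySem.Set.add [v] (List.replicate m v) = [v] := by
  induction m with
  | zero => simp
  | succ m ih =>
    rw [List.replicate_succ, List.foldl_cons]
    have : PySem.Set.add [v] v = [v] := by simp [PySem.Set.add, PySem.Set.contains]
    rw [this, ih]

theorem pvOfListRep (k : Nat) (hk : 1 ≤ k) (v : Int) :
    PySem.Set.ofList (List.replicate k v) = [v] := by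
  obtain ⟨m, rfl⟩ : ∃ m, k = m + 1 := ⟨k - 1, by omega⟩
  rw [PySem.Set.ofList_eq_foldl, List.replicate_succ, List.foldl_cons]
  have : PySem.Set.add [] v = [v] := by simp [PySem.Set.add, PySem.Set.contains]
  rw [this, pvOfListRepAux]

theorem pvMain (stresses : List Int) (hpre : Pre_get_unified_stress stresses) :
    get_unified_stress stresses = get_unified_stress_alt stresses := by
  obtain ⟨hne, hcase⟩ := hpre
  rcases hcase with hzero | ⟨v, hv, a, ha, k, hk, b, hb, hk1, hL⟩
  · have hallb : stresses.all (fun s => s == 0) = true := by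
      simp only [List.all_eq_true, beq_iff_eq]; exact hzero
    simp only [get_unified_stress, get_unified_stress_alt]
    rw [if_neg hne, if_neg hne, if_pos hallb]
    rw [pvFilterEnumZero _ _ hzero]
    simp
  · subst hL
    have hv' : v = 1 ∨ v = 2 := by simpa using hv
    have hv0 : v ≠ 0 := by rcases hv' with h | h <;> simp [h]
    have hvmem : v ∈ List.replicate a (0:Int) ++ List.replicate k v ++ List.replicate b 0 := by
      simp [List.mem_replicate]
      omega
    have hall0 : (List.replicate a (0:Int) ++ List.replicate k v ++ List.replicate b 0).all
        (fun s => s == 0) = false := by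
      rw [List.all_eq_false]
      exact ⟨v, hvmem, by simp [hv0]⟩
    have hfil : (List.replicate a (0:Int) ++ List.replicate k v ++ List.replicate b 0).filter
        (fun s => s != 0) = List.replicate k v := by
      simp [List.filter_append, hv0]
    have hhead : (List.replicate k v).headD 0 = v := by
      obtain ⟨m, hm⟩ : ∃ m, k = m + 1 := ⟨k - 1, by omega⟩
      simp [hm, List.replicate_succ]
    have hfold : (PySem.List.enumerate
          (List.replicate a (0:Int) ++ List.replicate k v ++ List.replicate b 0) 0).foldl
        (fun (p : Int × Int) (iv : Int × Int) =>
          if iv.2 == v then ((if p.1 == -1 then iv.1 else p.1), iv.1) else p) (-1, -1)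
        = ((a:Int), (a:Int) + (k:Int) - 1) := by
      rw [PySem.List.enumerate_append, PySem.List.enumerate_append]
      rw [List.foldl_append, List.foldl_append]
      simp only [List.length_replicate, zero_add]
      rw [pvZfold v hv0, pvZfold v hv0, pvMfold v k hk1 _ (Int.natCast_nonneg a)]
    have hany : (PySem.List.pyRange (a:Int) ((a:Int) + (k:Int) - 1 + 1)).any
        (fun i => PySem.List.pyGetD
          (List.replicate a (0:Int) ++ List.replicate k v ++ List.replicate b 0) i 1 == 0)
        = false := by
      rw [show ((a:Int) + (k:Int) - 1 + 1) = (a:Int) + (k:Int) by ring]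
      rw [List.any_eq_false]
      intro i hi
      rw [PySem.List.mem_pyRange_one] at hi
      rw [pvGetMid a k b v 1 i hi.1 hi.2]
      simp [hv0]
    have hA : get_unified_stress
        (List.replicate a (0:Int) ++ List.replicate k v ++ List.replicate b 0) = v := by
      simp only [get_unified_stress]
      rw [if_neg hne, hall0, if_neg Bool.false_ne_true]
      rw [hfil, hhead]
      rw [if_neg (by simp)]
      rw [if_neg (by tauto)]
      rw [hfold]
      simp only []
      rw [hany, if_neg Bool.false_ne_true]
    -- B side
    have hzfilter : ∀ (m : Nat) (s : Int),
        (PySem.List.enumerate (List.replicate m (0:Int)) s).filter (fun p => p.2 != 0) = [] :=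
      fun m s => pvFilterEnumZero _ _ (fun x hx => List.eq_of_mem_replicate hx)
    have hnz : ((PySem.List.enumerate
          (List.replicate a (0:Int) ++ List.replicate k v ++ List.replicate b 0) 0).filter
          (fun p => p.2 != 0)).map (fun p => p.1)
        = PySem.List.pyRange (a:Int) ((a:Int) + (k:Int)) := by
      rw [PySem.List.enumerate_append, PySem.List.enumerate_append]
      simp only [List.length_replicate, zero_add, List.filter_append, List.map_append]
      rw [hzfilter, hzfilter, pvFilterEnumNonzero k v _ hv0]
      simp [PySem.List.map_fst_enumerate]
    have hcons : PySem.List.pyRange (a:Int) ((a:Int) + (k:Int))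
        = (a:Int) :: PySem.List.pyRange ((a:Int) + 1) ((a:Int) + (k:Int)) :=
      PySem.List.pyRange_one_cons (by omega)
    have hlast : (PySem.List.pyRange (a:Int) ((a:Int) + (k:Int))).getLastD 0
        = (a:Int) + (k:Int) - 1 := by
      rw [show ((a:Int) + (k:Int)) = ((a:Int) + (k:Int) - 1) + 1 by ring]
      rw [PySem.List.pyRange_one_succ_right (by omega), List.getLastD_concat]
      ring
    have hlen : ((PySem.List.pyRange (a:Int) ((a:Int) + (k:Int))).length : Int) = (k:Int) := by
      rw [PySem.List.length_pyRange_one]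
      omega
    have hvals : (PySem.List.pyRange (a:Int) ((a:Int) + (k:Int))).map
        (fun i => PySem.List.pyGetD
          (List.replicate a (0:Int) ++ List.replicate k v ++ List.replicate b 0) i 0)
        = List.replicate k v := by
      rw [List.eq_replicate_iff]
      constructor
      · rw [List.length_map, PySem.List.length_pyRange_one]; omega
      · intro x hx
        rw [List.mem_map] at hx
        obtain ⟨i, hi, rfl⟩ := hx
        rw [PySem.List.mem_pyRange_one] at hi
        exact pvGetMid a k b v 0 i hi.1 hi.2
    have hA' : get_unified_stress_alt
        (List.replicate a (0:Int) ++ List.replicate k v ++ List.replicate b 0) = v := by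
      simp only [get_unified_stress_alt]
      rw [if_neg hne, hnz]
      rw [if_neg (by rw [hcons]; exact List.cons_ne_nil _ _)]
      rw [hvals, pvOfListRep k hk1 v]
      rw [if_neg (by rcases hv' with h | h <;> simp [h, PySem.Set.equal])]
      rw [hlast, hcons]
      simp only [List.headD_cons]
      rw [if_neg (by rw [← hcons, hlen]; intro h; exact h (by ring))]
      exact pvGetMid a k b v 0 (a:Int) (le_refl _) (by omega)
    rw [hA, hA']

-- ===== VERDICT (by name: the statement is the Claim_ definition above) =====
theorem get_unified_stress_spec : Claim_equal_get_unified_stress := by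
  intro stresses _ hpre
  exact pvMain stresses hpre
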